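-- pv_equiv track=rewrite | github.com/marcelowf/Analysis-of-Lotofacil-subsets | Data_Analysis/SB15_14.py | find_subsets_of_15_that_contain_14
-- ===== SOURCE A (Python) =====
-- def find_subsets_of_15_that_contain_14(combinations_15, combinations_14):
--     subset = []
--     set_14 = set(map(tuple, combinations_14))  # Convertendo para um conjunto de tuplas para facilitar a busca
--
--     for comb15 in combinations_15:
--         comb15_set = set(comb15)
--         matching_subsets = {subset_14 for subset_14 in set_14 if set(subset_14).issubset(comb15_set)}
--         if matching_subsets:
--             subset.append(comb15)
--             set_14 -= matching_subsets
--         if not set_14: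
--             break
--
--     return subset
-- ===== SOURCE B (Python) =====
-- def find_subsets_of_15_that_contain_14(combinations_15, combinations_14):
--     # Inverted scan: for each 14-combo find the FIRST 15-combo that contains it;
--     # a 15-combo is returned iff it is the first container of some 14-combo.
--     sets_15 = [set(c) for c in combinations_15]
--     hit = set()
--     for comb14 in combinations_14:
--         need = set(comb14)
--         for i, s in enumerate(sets_15):
--             if need <= s:
--                 hit.add(i)
--                 break
--     return [c for i, c in enumerate(combinations_15) if i in hit]
-- ===== Notes on version B (the rewrite author's own statement) =====
-- stated objective: faster
-- what changed: A makes a stateful forward pass over the 15-combos, rescanning (and rebuilding a set for) every still-unmatched 14-combo at each step; B inverts the loops: each 14-combo is converted to a set once and scans the precomputed 15-sets only until its FIRST container, and the result is the 15-combos whose index was some 14-combo's first hit.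
import Mathlib
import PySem

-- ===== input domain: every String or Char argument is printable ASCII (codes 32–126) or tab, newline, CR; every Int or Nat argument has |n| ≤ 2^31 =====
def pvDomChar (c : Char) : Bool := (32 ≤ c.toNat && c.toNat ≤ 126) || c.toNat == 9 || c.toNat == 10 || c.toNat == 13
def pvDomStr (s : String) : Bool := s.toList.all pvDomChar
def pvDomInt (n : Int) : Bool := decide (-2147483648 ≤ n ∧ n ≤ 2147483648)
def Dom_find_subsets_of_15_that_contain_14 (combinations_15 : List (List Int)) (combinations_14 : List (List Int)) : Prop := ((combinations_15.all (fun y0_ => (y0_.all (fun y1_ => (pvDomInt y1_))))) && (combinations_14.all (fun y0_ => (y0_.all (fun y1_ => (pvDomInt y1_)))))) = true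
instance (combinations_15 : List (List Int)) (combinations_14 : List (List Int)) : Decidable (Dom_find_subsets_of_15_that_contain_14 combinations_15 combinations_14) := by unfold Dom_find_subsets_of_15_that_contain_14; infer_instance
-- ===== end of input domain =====

-- B replaces A's stateful scan (for each 15-combo, rescan all still-unmatched 14-combos) by an
-- inverted scan: for each 14-combo find the first 15-combo containing it (breaking at the first hit),
-- then keep exactly the 15-combos that are a first container of some 14-combo.

-- ===== PORT A =====
-- set(subset_14).issubset(comb15_set)
def pvASub (t : List Int) (c : PySem.Set Int) : Bool :=
  PySem.Set.issubset (PySem.Set.ofList t) c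

-- the 'for comb15 in combinations_15' loop with its break and the running set_14
def pvALoop (set14 : PySem.Set (List Int)) : List (List Int) → List (List Int)
  | [] => []
  | comb15 :: rest =>
    let comb15_set := PySem.Set.ofList comb15
    let matching := set14.filter (fun t => pvASub t comb15_set)
    let set14' := PySem.Set.diff set14 matching
    let hd := if matching.isEmpty then [] else [comb15]
    if set14'.isEmpty then hd else hd ++ pvALoop set14' rest

def find_subsets_of_15_that_contain_14 (combinations_15 : List (List Int)) (combinations_14 : List (List Int)) : List (List Int) :=
  pvALoop (PySem.Set.ofList combinations_14) combinations_15

-- ===== PORT B =====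
-- the inner 'for i, s in enumerate(sets_15): if need <= s: …; break'
def pvFirstHit (need : PySem.Set Int) (i : Int) : List (PySem.Set Int) → Option Int
  | [] => none
  | s :: rest => if PySem.Set.issubset need s then some i else pvFirstHit need (i + 1) rest

def find_subsets_of_15_that_contain_14_alt (combinations_15 : List (List Int)) (combinations_14 : List (List Int)) : List (List Int) :=
  let sets_15 := combinations_15.map (fun c => PySem.Set.ofList c)
  let hit : PySem.Set Int := combinations_14.foldl (fun h comb14 =>
      match pvFirstHit (PySem.Set.ofList comb14) 0 sets_15 with
      | some i => PySem.Set.add h i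
      | none => h) PySem.Set.empty
  ((PySem.List.enumerate combinations_15 0).filter (fun p => PySem.Set.contains hit p.1)).map (fun p => p.2)

-- ===== PRECONDITION & SPEC =====
def Spec_find_subsets_of_15_that_contain_14 (combinations_15 : List (List Int)) (combinations_14 : List (List Int)) (out : List (List Int)) : Prop := out = find_subsets_of_15_that_contain_14_alt combinations_15 combinations_14
instance (combinations_15 : List (List Int)) (combinations_14 : List (List Int)) (out : List (List Int)) : Decidable (Spec_find_subsets_of_15_that_contain_14 combinations_15 combinations_14 out) := by unfold Spec_find_subsets_of_15_that_contain_14; infer_instance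

-- ===== CLAIM (what is proved, stated in full; the proofs are below) =====
def Claim_equal_find_subsets_of_15_that_contain_14 : Prop := ∀ (combinations_15 : List (List Int)) (combinations_14 : List (List Int)), Dom_find_subsets_of_15_that_contain_14 combinations_15 combinations_14 → Spec_find_subsets_of_15_that_contain_14 combinations_15 combinations_14 (find_subsets_of_15_that_contain_14 combinations_15 combinations_14)

-- ===== LEMMAS AND PROOFS =====

-- proof-side skeleton: keep those elements whose index satisfies q
def pvF (q : Int → Bool) : List (List Int) → List (List Int)
  | [] => []
  | c :: cs => (if q 0 then [c] else []) ++ pvF (fun i => q (i + 1)) cs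

theorem pvF_congr (q q' : Int → Bool) (cs : List (List Int))
    (h : ∀ i : Int, 0 ≤ i → q i = q' i) : pvF q cs = pvF q' cs := by
  induction cs generalizing q q' with
  | nil => rfl
  | cons c cs ih =>
    simp only [pvF, h 0 le_rfl]
    rw [ih (fun i => q (i+1)) (fun i => q' (i+1)) (fun i hi => h (i+1) (by omega))]

theorem pvF_false (q : Int → Bool) (cs : List (List Int))
    (h : ∀ i : Int, 0 ≤ i → q i = false) : pvF q cs = [] := by
  induction cs generalizing q with
  | nil => rfl
  | cons c cs ih =>
    simp only [pvF, h 0 le_rfl]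
    simpa using ih (fun i => q (i+1)) (fun i hi => h (i+1) (by omega))

-- the comprehension [c for i, c in enumerate(xs) if q(i)] is pvF of the shifted predicate
theorem pvEnum_filter (q : Int → Bool) (cs : List (List Int)) (s : Int) :
    ((PySem.List.enumerate cs s).filter (fun p => q p.1)).map (fun p => p.2)
      = pvF (fun i => q (i + s)) cs := by
  induction cs generalizing q s with
  | nil => rfl
  | cons c cs ih =>
    rw [PySem.List.enumerate_cons]
    have hsh : (fun i : Int => q (i + (s+1))) = (fun i : Int => q ((i + 1) + s)) := by
      funext i; ring_nf
    by_cases hq : q s = true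
    · simp only [List.filter_cons]
      rw [if_pos hq, List.map_cons, ih q (s+1), hsh]
      simp [pvF, hq]
    · simp only [List.filter_cons]
      rw [if_neg hq, ih q (s+1), hsh]
      simp [pvF, hq]

theorem pvFirstHit_shift (need : PySem.Set Int) (l : List (PySem.Set Int)) (i : Int) :
    pvFirstHit need i l = (pvFirstHit need 0 l).map (fun j => j + i) := by
  induction l generalizing i with
  | nil => rfl
  | cons s rest ih =>
    simp only [pvFirstHit]
    by_cases h : PySem.Set.issubset need s = true
    · simp [h]
    · rw [if_neg h, if_neg h, ih (i+1), ih (0+1)]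
      cases pvFirstHit need 0 rest with
      | none => rfl
      | some j => simp; ring

theorem pvFirstHit_nonneg (need : PySem.Set Int) (l : List (PySem.Set Int)) (i j : Int)
    (h : pvFirstHit need i l = some j) : i ≤ j := by
  induction l generalizing i with
  | nil => simp [pvFirstHit] at h
  | cons s rest ih =>
    simp only [pvFirstHit] at h
    split at h
    · simp only [Option.some.injEq] at h; omega
    · have := ih (i+1) h; omega

-- membership in B's 'hit' set after the fold
theorem pv_hit_mem (c14s : List (List Int)) (sets15 : List (PySem.Set Int))
    (h0 : PySem.Set Int) (i : Int) :
    (PySem.Set.contains (c14s.foldl (fun h comb14 =>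
        match pvFirstHit (PySem.Set.ofList comb14) 0 sets15 with
        | some j => PySem.Set.add h j
        | none => h) h0) i)
      = (i ∈ h0 || c14s.any (fun t => pvFirstHit (PySem.Set.ofList t) 0 sets15 == some i)) := by
  induction c14s generalizing h0 with
  | nil => simp
  | cons t ts ih =>
    simp only [List.foldl_cons, List.any_cons]
    rcases hft : pvFirstHit (PySem.Set.ofList t) 0 sets15 with _ | j
    · rw [ih h0]
      simp
    · rw [ih (PySem.Set.add h0 j)]
      by_cases hij : i = j
      · subst hij; simp [PySem.Set.mem_add]
      · have hji : (j == i) = false := by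
          simp only [beq_eq_false_iff_ne]; omega
        simp [PySem.Set.mem_add, hij, hji]

-- set_14 -= matching is just a filter by the negated test
theorem pvDiff_filter (R : List (List Int)) (p : List Int → Bool) :
    PySem.Set.diff R (R.filter p) = R.filter (fun t => !p t) := by
  have : ∀ x ∈ R, (!PySem.Set.contains (R.filter p) x) = !p x := by
    intro x hx
    by_cases hp : p x = true
    · simp [List.mem_filter, hx, hp]
    · simp [List.mem_filter, Bool.eq_false_iff.mpr hp]
  calc PySem.Set.diff R (R.filter p) = R.filter (fun x => !PySem.Set.contains (R.filter p) x) := rfl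
    _ = R.filter (fun t => !p t) := List.filter_congr this

theorem pvIsEmpty_filter (R : List (List Int)) (p : List Int → Bool) :
    (R.filter p).isEmpty = !R.any p := by
  cases h : R.any p <;>
    simp_all [List.isEmpty_iff, List.filter_eq_nil_iff, List.any_eq_true]

-- the main invariant: A's loop equals the index filter built from first-hit indices,
-- for an ARBITRARY working list R (duplicates allowed)
theorem pvMain (cs : List (List Int)) (R : List (List Int)) :
    pvALoop R cs
      = pvF (fun i => R.any (fun t =>
            pvFirstHit (PySem.Set.ofList t) 0 (cs.map (fun c => PySem.Set.ofList c)) == some i)) cs := by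
  induction cs generalizing R with
  | nil => rfl
  | cons c cs ih =>
    have hq0 : ∀ t : List Int,
        (pvFirstHit (PySem.Set.ofList t) 0 ((c :: cs).map (fun c => PySem.Set.ofList c)) == some 0)
          = pvASub t (PySem.Set.ofList c) := by
      intro t
      simp only [List.map_cons, pvFirstHit]
      by_cases h : PySem.Set.issubset (PySem.Set.ofList t) (PySem.Set.ofList c) = true
      · simp [pvASub, h]
      · rw [if_neg h, pvFirstHit_shift]
        rcases hft : pvFirstHit (PySem.Set.ofList t) 0 (cs.map (fun c => PySem.Set.ofList c)) with _ | j
        · simp [pvASub, Bool.eq_false_iff.mpr h]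
        · have hj : 0 ≤ j := pvFirstHit_nonneg _ _ _ _ hft
          simp only [pvASub, Bool.eq_false_iff.mpr h, Option.map_some]
          rw [Bool.eq_iff_iff]
          simp only [beq_iff_eq, Option.some.injEq]
          constructor
          · intro hx; omega
          · intro hx; cases hx
    have hq1 : ∀ i : Int, 0 ≤ i →
        (R.any (fun t => pvFirstHit (PySem.Set.ofList t) 0 ((c :: cs).map (fun c => PySem.Set.ofList c)) == some (i + 1)))
          = ((R.filter (fun t => !pvASub t (PySem.Set.ofList c))).any
              (fun t => pvFirstHit (PySem.Set.ofList t) 0 (cs.map (fun c => PySem.Set.ofList c)) == some i)) := by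
      intro i hi
      rw [List.any_filter]
      have : ∀ t : List Int,
          (pvFirstHit (PySem.Set.ofList t) 0 ((c :: cs).map (fun c => PySem.Set.ofList c)) == some (i + 1))
            = ((!pvASub t (PySem.Set.ofList c)) &&
               (pvFirstHit (PySem.Set.ofList t) 0 (cs.map (fun c => PySem.Set.ofList c)) == some i)) := by
        intro t
        simp only [List.map_cons, pvFirstHit]
        by_cases h : PySem.Set.issubset (PySem.Set.ofList t) (PySem.Set.ofList c) = true
        · have hne : (0:Int) ≠ i + 1 := by omega
          simp [pvASub, h, hne]
        · rw [if_neg h, pvFirstHit_shift]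
          rcases hft : pvFirstHit (PySem.Set.ofList t) 0 (cs.map (fun c => PySem.Set.ofList c)) with _ | j
          · simp [pvASub, Bool.eq_false_iff.mpr h]
          · simp [pvASub, Bool.eq_false_iff.mpr h]
      simp only [this]
    simp only [pvALoop, pvF]
    rw [pvDiff_filter, pvIsEmpty_filter, pvIsEmpty_filter]
    simp only [hq0]
    have htail : pvF (fun i => R.any (fun t =>
          pvFirstHit (PySem.Set.ofList t) 0 ((c :: cs).map (fun c => PySem.Set.ofList c)) == some (i + 1))) cs
        = pvALoop (R.filter (fun t => !pvASub t (PySem.Set.ofList c))) cs := by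
      rw [ih]
      exact pvF_congr _ _ cs hq1
    rw [htail]
    by_cases hRem : R.any (fun t => !pvASub t (PySem.Set.ofList c)) = true
    · by_cases hA : R.any (fun t => pvASub t (PySem.Set.ofList c)) = true <;>
        simp [hRem, hA]
    · rw [Bool.not_eq_true] at hRem
      have hnil : R.filter (fun t => !pvASub t (PySem.Set.ofList c)) = [] :=
        List.filter_eq_nil_iff.mpr (List.any_eq_false.mp hRem)
      have hz : pvALoop ([] : List (List Int)) cs = [] := by
        rw [ih []]
        exact pvF_false _ _ (fun i _ => rfl)
      rw [hnil, hz]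
      by_cases hA : R.any (fun t => pvASub t (PySem.Set.ofList c)) = true <;>
        simp [hRem, hA]

-- ===== VERDICT (by name: the statement is the Claim_ definition above) =====
theorem pv_ofList_any (l : List (List Int)) (f : List Int → Bool) :
    (PySem.Set.ofList l).any f = l.any f := by
  rw [Bool.eq_iff_iff]
  simp [List.any_eq_true, PySem.Set.mem_ofList]

theorem find_subsets_of_15_that_contain_14_spec : Claim_equal_find_subsets_of_15_that_contain_14 := by
  intro combinations_15 combinations_14 _
  unfold Spec_find_subsets_of_15_that_contain_14 find_subsets_of_15_that_contain_14
    find_subsets_of_15_that_contain_14_alt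
  rw [pvMain]
  simp only [pv_hit_mem]
  have hmem : ∀ i : Int, (decide (i ∈ PySem.Set.empty (α := Int)) : Bool) = false := by
    intro i; simp [PySem.Set.empty]
  simp only [hmem, Bool.false_or]
  rw [pvEnum_filter (fun i => combinations_14.any fun t =>
        pvFirstHit (PySem.Set.ofList t) 0 (List.map (fun c => PySem.Set.ofList c) combinations_15) == some i)
      combinations_15 0]
  apply pvF_congr
  intro i _
  rw [pv_ofList_any, Int.add_zero]
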